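-- pv_equiv track=rewrite | github.com/pypi-data/pypi-mirror-400 | packages/scidx-streaming/scidx_streaming-0.1.9-py3-none-any.whl/scidx_streaming/streams/creation/base.py | next_stream_id
-- ===== SOURCE A (Python) =====
-- from typing import Any, Iterable, Mapping, Sequence
--
-- def next_stream_id(existing_topics: Sequence[str], topic_base: str, max_streams: int) -> int:
--     """Find the next available numeric suffix for a derived topic.
--
--     Raises
--     ------
--     RuntimeError
--         When no free suffix exists up to ``max_streams``.
--     """
--
--     used: set[int] = set()
--     for topic in existing_topics:
--         if not topic.startswith(topic_base):
--             continue
--         suffix = topic[len(topic_base) :]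
--         if suffix.isdigit():
--             used.add(int(suffix))
--
--     for candidate in range(max_streams):
--         if candidate not in used:
--             return candidate
--     raise RuntimeError(f"No available stream ids for prefix '{topic_base}' (max_streams={max_streams}).")
-- ===== SOURCE B (Python) =====
-- def next_stream_id(existing_topics, topic_base, max_streams):
--     """Find the next available numeric suffix by sorting the used ids and
--     walking for the first gap (instead of probing every candidate)."""
--     suffixes = []
--     for topic in existing_topics:
--         suffix = topic[len(topic_base):]
--         if topic.startswith(topic_base) and suffix.isdigit():
--             suffixes.append(int(suffix))
--     expected = 0
--     for v in sorted(suffixes):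
--         if v == expected:
--             expected += 1
--         elif v > expected:
--             break
--     if expected < max_streams:
--         return expected
--     raise RuntimeError(f"No available stream ids for prefix '{topic_base}' (max_streams={max_streams}).")
-- ===== Notes on version B (the rewrite author's own statement) =====
-- stated objective: alternative
-- what changed: Instead of probing every candidate in range(max_streams) against a set, B collects the numeric suffixes into a list, sorts it, and finds the smallest free id by a single gap walk over the sorted values.
import Mathlib
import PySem

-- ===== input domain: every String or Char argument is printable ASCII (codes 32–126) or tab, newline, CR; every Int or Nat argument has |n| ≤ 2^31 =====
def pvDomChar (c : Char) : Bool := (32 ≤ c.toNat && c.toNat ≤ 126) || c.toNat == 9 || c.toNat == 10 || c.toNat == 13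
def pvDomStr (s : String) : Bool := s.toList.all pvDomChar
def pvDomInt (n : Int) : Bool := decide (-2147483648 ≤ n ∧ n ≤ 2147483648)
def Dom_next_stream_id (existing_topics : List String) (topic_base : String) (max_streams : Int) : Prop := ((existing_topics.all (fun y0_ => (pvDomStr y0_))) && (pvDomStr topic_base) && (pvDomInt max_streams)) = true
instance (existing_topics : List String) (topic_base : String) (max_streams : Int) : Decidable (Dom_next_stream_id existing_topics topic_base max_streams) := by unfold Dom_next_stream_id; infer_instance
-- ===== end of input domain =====

-- B replaces A's membership probe over every candidate in range(max_streams) by sorting the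
-- collected suffixes and walking the sorted list for the first gap (objective: alternative).

-- ===== PORT A =====
-- A's early-return loop 'for candidate in range(max_streams): if candidate not in used: return candidate'
def pvFindFree (used : PySem.Set Int) : Nat → Int → Option Int
  | 0, _ => none
  | n + 1, c => if !(PySem.Set.contains used c) then some c else pvFindFree used n (c + 1)

def next_stream_id (existing_topics : List String) (topic_base : String) (max_streams : Int) : Int :=
  let used : PySem.Set Int := existing_topics.foldl (fun used topic =>
    if !(PySem.Str.startswith topic topic_base) then used
    else
      let suffix := PySem.Str.slice topic (some (PySem.Str.len topic_base)) none
      if PySem.Str.strIsdigit suffix then PySem.Set.add used ((PySem.Int.ofStr? suffix).getD 0)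
      else used) PySem.Set.empty
  match pvFindFree used max_streams.toNat 0 with
  | some c => c
  | none => 0   -- Python raises RuntimeError here; excluded by Pre_next_stream_id

-- ===== PORT B =====
-- the gap walk of Source B: for v in sorted: v==e → e+1; v>e → break; else continue
def pvGapWalk : Int → List Int → Int
  | e, [] => e
  | e, v :: rest => if v = e then pvGapWalk (e + 1) rest
                    else if v > e then e
                    else pvGapWalk e rest

def next_stream_id_alt (existing_topics : List String) (topic_base : String) (max_streams : Int) : Int :=
  let suffixes : List Int := existing_topics.foldl (fun acc topic =>
    if PySem.Str.startswith topic topic_base &&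
       PySem.Str.strIsdigit (PySem.Str.slice topic (some (PySem.Str.len topic_base)) none) then
      acc ++ [(PySem.Int.ofStr? (PySem.Str.slice topic (some (PySem.Str.len topic_base)) none)).getD 0]
    else acc) []
  let expected := pvGapWalk 0 (PySem.List.sorted suffixes (fun v => v))
  if expected < max_streams then expected
  else 0   -- Python raises RuntimeError here; excluded by Pre_next_stream_id

-- ===== PRECONDITION & SPEC =====
-- the numeric-suffix value a topic contributes (used only to state Pre_)
def pvSuff? (topic_base topic : String) : Option Int :=
  if PySem.Str.startswith topic topic_base &&
     PySem.Str.strIsdigit (PySem.Str.slice topic (some (PySem.Str.len topic_base)) none) then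
    some ((PySem.Int.ofStr? (PySem.Str.slice topic (some (PySem.Str.len topic_base)) none)).getD 0)
  else none

-- Pre_ holds exactly when A returns: some candidate below max_streams is free (A raises
-- RuntimeError otherwise); the smallest free id is at most the number of topics, so the
-- bounded search below is exact.
def Pre_next_stream_id (existing_topics : List String) (topic_base : String) (max_streams : Int) : Prop :=
  ∃ c ∈ List.range (existing_topics.length + 1),
    (c : Int) < max_streams ∧ ∀ t ∈ existing_topics, pvSuff? topic_base t ≠ some (c : Int)
instance (existing_topics : List String) (topic_base : String) (max_streams : Int) : Decidable (Pre_next_stream_id existing_topics topic_base max_streams) := by unfold Pre_next_stream_id; infer_instance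

def pvWitness_next_stream_id : List String × String × Int := (["t0"], "t", 3)

def Spec_next_stream_id (existing_topics : List String) (topic_base : String) (max_streams : Int) (out : Int) : Prop := out = next_stream_id_alt existing_topics topic_base max_streams
instance (existing_topics : List String) (topic_base : String) (max_streams : Int) (out : Int) : Decidable (Spec_next_stream_id existing_topics topic_base max_streams out) := by unfold Spec_next_stream_id; infer_instance

-- ===== CLAIM (what is proved, stated in full; the proofs are below) =====
def Claim_equal_next_stream_id : Prop := ∀ (existing_topics : List String) (topic_base : String) (max_streams : Int), Dom_next_stream_id existing_topics topic_base max_streams → Pre_next_stream_id existing_topics topic_base max_streams → Spec_next_stream_id existing_topics topic_base max_streams (next_stream_id existing_topics topic_base max_streams)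

-- ===== LEMMAS AND PROOFS =====

-- the filter/map predicate of both ports
def pvP (topic_base : String) (t : String) : Bool :=
  PySem.Str.startswith t topic_base &&
  PySem.Str.strIsdigit (PySem.Str.slice t (some (PySem.Str.len topic_base)) none)
def pvF (topic_base : String) (t : String) : Int :=
  (PySem.Int.ofStr? (PySem.Str.slice t (some (PySem.Str.len topic_base)) none)).getD 0
def pvVals (existing_topics : List String) (topic_base : String) : List Int :=
  (existing_topics.filter (pvP topic_base)).map (pvF topic_base)

lemma pvB_suffixes (existing_topics : List String) (topic_base : String) :
    existing_topics.foldl (fun acc topic =>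
      if PySem.Str.startswith topic topic_base &&
         PySem.Str.strIsdigit (PySem.Str.slice topic (some (PySem.Str.len topic_base)) none) then
        acc ++ [(PySem.Int.ofStr? (PySem.Str.slice topic (some (PySem.Str.len topic_base)) none)).getD 0]
      else acc) []
    = pvVals existing_topics topic_base := by
  simpa [pvVals, pvP, pvF] using
    PySem.List.foldl_append_if (pvP topic_base) (pvF topic_base) existing_topics []

lemma pvA_used (existing_topics : List String) (topic_base : String) (s : PySem.Set Int) :
    existing_topics.foldl (fun used topic =>
      if !(PySem.Str.startswith topic topic_base) then used
      else
        if PySem.Str.strIsdigit (PySem.Str.slice topic (some (PySem.Str.len topic_base)) none) then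
          PySem.Set.add used ((PySem.Int.ofStr? (PySem.Str.slice topic (some (PySem.Str.len topic_base)) none)).getD 0)
        else used) s
    = (pvVals existing_topics topic_base).foldl PySem.Set.add s := by
  induction existing_topics generalizing s with
  | nil => simp [pvVals]
  | cons t rest ih =>
    rw [List.foldl_cons, ih]
    by_cases h1 : PySem.Str.startswith t topic_base
    · by_cases h2 : PySem.Str.strIsdigit (PySem.Str.slice t (some (PySem.Str.len topic_base)) none)
      · simp at h1 h2
        simp [pvVals, pvP, pvF, h1, h2]
      · simp at h1 h2
        simp [pvVals, pvP, h1, h2]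
    · simp at h1
      simp [pvVals, pvP, h1]

lemma pv_mem_used (vals : List Int) (x : Int) :
    x ∈ vals.foldl PySem.Set.add ([] : PySem.Set Int) ↔ x ∈ vals := by
  rw [← PySem.Set.ofList_eq_foldl]
  exact PySem.Set.mem_ofList vals x

-- gap-walk specification on a sorted list
lemma pvGapWalk_spec (s : List Int) (hs : s.Pairwise (· ≤ ·)) (e : Int) :
    e ≤ pvGapWalk e s ∧ pvGapWalk e s ∉ s ∧
      ∀ k, e ≤ k → k < pvGapWalk e s → k ∈ s := by
  induction s generalizing e with
  | nil => refine ⟨le_refl e, by simp [pvGapWalk], ?_⟩; intro k h1 h2; simp [pvGapWalk] at h2; omega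
  | cons v rest ih =>
    have hrest := (List.pairwise_cons.mp hs).2
    have hall := (List.pairwise_cons.mp hs).1
    by_cases hv : v = e
    · subst hv
      obtain ⟨h1, h2, h3⟩ := ih hrest (v + 1)
      have hw : pvGapWalk v (v :: rest) = pvGapWalk (v + 1) rest := by
        simp [pvGapWalk]
      rw [hw]
      refine ⟨by omega, ?_, ?_⟩
      · intro hmem
        rcases List.mem_cons.mp hmem with h | h
        · omega
        · exact h2 h
      · intro k hk1 hk2
        rcases eq_or_lt_of_le hk1 with h | h
        · exact List.mem_cons.mpr (Or.inl h.symm)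
        · exact List.mem_cons.mpr (Or.inr (h3 k (by omega) hk2))
    · by_cases hgt : v > e
      · have hw : pvGapWalk e (v :: rest) = e := by
          simp [pvGapWalk, hv, hgt]
        rw [hw]
        refine ⟨le_refl e, ?_, ?_⟩
        · intro hmem
          rcases List.mem_cons.mp hmem with h | h
          · omega
          · have := hall e h; omega
        · intro k hk1 hk2; omega
      · obtain ⟨h1, h2, h3⟩ := ih hrest e
        have hw : pvGapWalk e (v :: rest) = pvGapWalk e rest := by
          simp [pvGapWalk, hv, hgt]
        rw [hw]
        refine ⟨h1, ?_, ?_⟩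
        · intro hmem
          rcases List.mem_cons.mp hmem with h | h
          · omega
          · exact h2 h
        · intro k hk1 hk2
          exact List.mem_cons.mpr (Or.inr (h3 k hk1 hk2))

-- A's range scan, characterised by the least free value
lemma pv_find_spec (used : PySem.Set Int) (vals : List Int)
    (hused : ∀ c, PySem.Set.contains used c = decide (c ∈ vals))
    (m b : Int) (n : Nat) (a : Int) (hn : (b - a).toNat = n)
    (ha : a ≤ m) (hmem : ∀ k, a ≤ k → k < m → k ∈ vals) (hnot : m ∉ vals) :
    pvFindFree used n a = if m < b then some m else none := by
  induction n generalizing a with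
  | zero =>
    have hba : b ≤ a := by omega
    simp [pvFindFree]
    omega
  | succ n ih =>
    have hab : a < b := by omega
    by_cases hae : a = m
    · subst hae
      rw [pvFindFree, hused]
      simp [hnot, hab]
    · have hma : a < m := lt_of_le_of_ne ha hae
      have hmem_a : a ∈ vals := hmem a le_rfl hma
      rw [pvFindFree, hused]
      simp only [hmem_a, decide_true, Bool.not_true, Bool.false_eq_true, if_false]
      exact ih (a + 1) (by omega) (by omega) (fun k hk1 hk2 => hmem k (by omega) hk2)

lemma pv_mem_vals (existing_topics : List String) (topic_base : String) (x : Int) :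
    x ∈ pvVals existing_topics topic_base ↔
      ∃ t ∈ existing_topics, pvSuff? topic_base t = some x := by
  have hdef : ∀ t, pvSuff? topic_base t
      = if pvP topic_base t then some (pvF topic_base t) else none := fun t => rfl
  constructor
  · intro hx
    obtain ⟨t, ht, hfx⟩ := List.mem_map.mp hx
    obtain ⟨htmem, htp⟩ := List.mem_filter.mp ht
    exact ⟨t, htmem, by rw [hdef, if_pos htp, hfx]⟩
  · rintro ⟨t, htmem, hsuf⟩
    rw [hdef] at hsuf
    by_cases hp : pvP topic_base t
    · rw [if_pos hp] at hsuf
      exact List.mem_map.mpr ⟨t, List.mem_filter.mpr ⟨htmem, hp⟩, Option.some.inj hsuf⟩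
    · rw [if_neg hp] at hsuf
      exact absurd hsuf (by simp)

theorem next_stream_id_spec : Claim_equal_next_stream_id := by
  intro existing_topics topic_base max_streams _hdom hpre
  simp only [Spec_next_stream_id, next_stream_id, next_stream_id_alt]
  rw [pvB_suffixes]
  set vals := pvVals existing_topics topic_base with hvals
  set srt := PySem.List.sorted vals (fun v => v) with hsrt
  have hsortp : srt.Pairwise (· ≤ ·) := by
    simpa using PySem.List.sorted_pairwise vals (fun v => v)
  obtain ⟨hr0, hrnot, hrall⟩ := pvGapWalk_spec srt hsortp 0
  set r := pvGapWalk 0 srt with hr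
  have hmem_srt : ∀ x, x ∈ srt ↔ x ∈ vals := fun x =>
    PySem.List.mem_sorted vals (fun v => v) false x
  -- A's used set has the same members
  rw [pvA_used]
  have hnotv : r ∉ vals := fun h => hrnot ((hmem_srt r).mpr h)
  have hallv : ∀ k, (0:Int) ≤ k → k < r → k ∈ vals :=
    fun k h1 h2 => (hmem_srt k).mp (hrall k h1 h2)
  -- r is below max_streams thanks to Pre_
  have hrlt : r < max_streams := by
    obtain ⟨c, _hcr, hclt, hcfree⟩ := hpre
    have hcnot : (c : Int) ∉ vals := by
      intro h
      obtain ⟨t, htmem, hsuf⟩ := (pv_mem_vals existing_topics topic_base c).mp h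
      exact hcfree t htmem hsuf
    have : r ≤ (c : Int) := by
      by_contra hlt
      exact hcnot (hallv c (by positivity) (by omega))
    omega
  -- rewrite A's membership test and apply the range-scan characterisation
  have hused : ∀ c, PySem.Set.contains (vals.foldl PySem.Set.add PySem.Set.empty) c
      = decide (c ∈ vals) := by
    intro c
    have : c ∈ vals.foldl PySem.Set.add ([] : PySem.Set Int) ↔ c ∈ vals := pv_mem_used vals c
    simp [PySem.Set.contains, PySem.Set.empty, this]
  rw [pv_find_spec (vals.foldl PySem.Set.add PySem.Set.empty) vals hused r max_streams
      max_streams.toNat 0 (by omega) hr0 hallv hnotv,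
    if_pos hrlt, if_pos hrlt]
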